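-- pv_equiv track=rewrite | github.com/Sahana-k30/gf3 | gf3/utils.py | message_to_gf3
-- ===== SOURCE A (Python) =====
-- def message_to_gf3(message: str):
--     symbols = []
--     for ch in message:
--         v = ord(ch)
--         for _ in range(6):   # 6 trits per character (safe for ASCII)
--             symbols.append(v % 3)
--             v //= 3
--     return symbols
-- ===== SOURCE B (Python) =====
-- def message_to_gf3(message: str):
--     powers = [1, 3, 9, 27, 81, 243]
--     return [(ord(ch) // p) % 3 for ch in message for p in powers]
-- ===== Notes on version B (the rewrite author's own statement) =====
-- stated objective: simpler
-- what changed: Replaces the mutating running-division accumulator (v %= / //= 3 inside an append loop) with direct positional digit extraction via a precomputed power table in a single comprehension.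
import Mathlib
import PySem

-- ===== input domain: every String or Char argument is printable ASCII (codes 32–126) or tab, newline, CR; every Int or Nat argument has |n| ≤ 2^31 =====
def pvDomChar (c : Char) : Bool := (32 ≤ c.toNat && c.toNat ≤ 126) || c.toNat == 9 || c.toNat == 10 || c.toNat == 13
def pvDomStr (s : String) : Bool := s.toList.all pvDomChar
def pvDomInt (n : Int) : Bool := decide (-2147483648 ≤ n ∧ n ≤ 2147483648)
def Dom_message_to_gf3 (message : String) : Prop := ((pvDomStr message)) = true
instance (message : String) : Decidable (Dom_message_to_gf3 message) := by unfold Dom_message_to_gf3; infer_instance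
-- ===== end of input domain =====

-- B replaces A's mutating running-division accumulator with direct positional digit
-- extraction from a precomputed power table (objective: simpler).

-- ===== PORT A =====
-- literal port: outer loop over characters carrying 'symbols'; inner loop of 6 steps
-- carrying (symbols, v), appending v % 3 and updating v //= 3
def message_to_gf3 (message : String) : List Int :=
  message.toList.foldl
    (fun symbols ch =>
      ((PySem.List.pyRange 0 6 1).foldl
        (fun (st : List Int × Int) _ =>
          (st.1 ++ [PySem.Int.mod st.2 3], PySem.Int.floordiv st.2 3))
        (symbols, (ch.toNat : Int))).1)
    []

-- ===== PORT B =====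
-- literal port of Source B: power table + nested comprehension (flatMap/map)
def message_to_gf3_alt (message : String) : List Int :=
  message.toList.flatMap
    (fun ch => ([1, 3, 9, 27, 81, 243] : List Int).map
      (fun p => PySem.Int.mod (PySem.Int.floordiv ((ch.toNat : Int)) p) 3))

-- ===== PRECONDITION & SPEC =====
def Spec_message_to_gf3 (message : String) (out : List Int) : Prop := out = message_to_gf3_alt message
instance (message : String) (out : List Int) : Decidable (Spec_message_to_gf3 message out) := by unfold Spec_message_to_gf3; infer_instance

-- ===== CLAIM (what is proved, stated in full; the proofs are below) =====
def Claim_equal_message_to_gf3 : Prop := ∀ (message : String), Dom_message_to_gf3 message → Spec_message_to_gf3 message (message_to_gf3 message)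

-- ===== LEMMAS AND PROOFS =====

-- A's inner 6-step loop appends exactly B's six positional trits for the character
lemma pv_inner_step (symbols : List Int) (v : Int) :
    ((PySem.List.pyRange 0 6 1).foldl
      (fun (st : List Int × Int) _ =>
        (st.1 ++ [PySem.Int.mod st.2 3], PySem.Int.floordiv st.2 3))
      (symbols, v)).1
    = symbols ++ ([1, 3, 9, 27, 81, 243] : List Int).map
        (fun p => PySem.Int.mod (PySem.Int.floordiv v p) 3) := by
  have hr : PySem.List.pyRange 0 6 1 = [0, 1, 2, 3, 4, 5] := by decide
  rw [hr]
  simp only [List.foldl, List.map, List.append_assoc, List.cons_append, List.nil_append,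
    List.append_cancel_left_eq]
  simp only [PySem.Int.mod_eq_emod_of_pos (b := 3) (by norm_num),
    PySem.Int.floordiv_eq_ediv_of_pos (b := 3) (by norm_num),
    PySem.Int.floordiv_eq_ediv_of_pos (b := 1) (by norm_num),
    PySem.Int.floordiv_eq_ediv_of_pos (b := 9) (by norm_num),
    PySem.Int.floordiv_eq_ediv_of_pos (b := 27) (by norm_num),
    PySem.Int.floordiv_eq_ediv_of_pos (b := 81) (by norm_num),
    PySem.Int.floordiv_eq_ediv_of_pos (b := 243) (by norm_num)]
  simp only [List.cons.injEq, and_true]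
  have h9 : v / 3 / 3 = v / 9 := by
    rw [Int.ediv_ediv_of_nonneg (by norm_num : (0:Int) ≤ 3)]; norm_num
  have h27 : v / 9 / 3 = v / 27 := by
    rw [Int.ediv_ediv_of_nonneg (by norm_num : (0:Int) ≤ 9)]; norm_num
  have h81 : v / 27 / 3 = v / 81 := by
    rw [Int.ediv_ediv_of_nonneg (by norm_num : (0:Int) ≤ 27)]; norm_num
  have h243 : v / 81 / 3 = v / 243 := by
    rw [Int.ediv_ediv_of_nonneg (by norm_num : (0:Int) ≤ 81)]; norm_num
  simp only [h9, h27, h81, h243, Int.ediv_one, and_self]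

-- A's whole fold, started from any accumulator, equals accumulator ++ B's output
lemma pv_fold_acc (cs : List Char) (acc : List Int) :
    cs.foldl
      (fun symbols ch =>
        ((PySem.List.pyRange 0 6 1).foldl
          (fun (st : List Int × Int) _ =>
            (st.1 ++ [PySem.Int.mod st.2 3], PySem.Int.floordiv st.2 3))
          (symbols, (ch.toNat : Int))).1)
      acc
    = acc ++ cs.flatMap
        (fun ch => ([1, 3, 9, 27, 81, 243] : List Int).map
          (fun p => PySem.Int.mod (PySem.Int.floordiv ((ch.toNat : Int)) p) 3)) := by
  induction cs generalizing acc with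
  | nil => simp
  | cons c t ih =>
      simp only [List.foldl, List.flatMap_cons]
      rw [pv_inner_step, ih, List.append_assoc]

-- ===== VERDICT (by name: the statement is the Claim_ definition above) =====
theorem message_to_gf3_spec : Claim_equal_message_to_gf3 := by
  intro message _
  unfold Spec_message_to_gf3 message_to_gf3 message_to_gf3_alt
  simpa using pv_fold_acc message.toList []
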